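-- pv_equiv track=rewrite | github.com/joshkel/advent-of-python | day01.py | elevator_iter
-- ===== SOURCE A (Python) =====
-- def elevator_iter(s):
--     position = 0
--     for c in s:
--         if c == '(':
--             position += 1
--         if c == ')':
--             position -= 1
--         yield position
-- ===== SOURCE B (Python) =====
-- def elevator_iter(s):
--     for i in range(len(s)):
--         prefix = s[:i + 1]
--         yield prefix.count('(') - prefix.count(')')
-- ===== Notes on version B (the rewrite author's own statement) =====
-- stated objective: alternative
-- what changed: B keeps no running state: each yielded value is computed independently as the number of opening minus closing parentheses in the prefix s[:i+1], instead of A's mutable position threaded through the loop; this trades A's linear single pass for quadratic total work.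
import Mathlib
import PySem

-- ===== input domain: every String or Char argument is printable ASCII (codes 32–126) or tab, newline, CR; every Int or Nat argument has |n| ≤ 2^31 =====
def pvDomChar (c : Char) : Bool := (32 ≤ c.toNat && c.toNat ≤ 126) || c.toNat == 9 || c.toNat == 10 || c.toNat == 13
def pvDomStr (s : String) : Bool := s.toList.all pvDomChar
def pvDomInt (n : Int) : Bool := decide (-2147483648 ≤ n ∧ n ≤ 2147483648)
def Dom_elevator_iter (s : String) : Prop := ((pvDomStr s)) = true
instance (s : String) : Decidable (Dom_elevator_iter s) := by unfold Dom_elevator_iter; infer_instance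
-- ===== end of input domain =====

-- B is stateless: each yielded value is a closed-form pfx count instead of A's running position (alternative; not faster).
-- ===== PORT A =====
-- loop state: (yielded values so far, position)
def elevator_iter (s : String) : List Int :=
  (s.toList.foldl (fun (acc : List Int × Int) c =>
      let position := acc.2
      let position := if c = '(' then position + 1 else position
      let position := if c = ')' then position - 1 else position
      (acc.1 ++ [position], position)) ([], 0)).1

-- ===== PORT B =====
def elevator_iter_alt (s : String) : List Int :=
  (PySem.List.pyRange 0 (s.toList.length : Int) 1).map (fun i =>
    let pfx := PySem.List.slice s.toList none (some (i + 1))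
    (PySem.Chars.count pfx ['('] : Int) - (PySem.Chars.count pfx [')'] : Int))

-- ===== PRECONDITION & SPEC =====
def Spec_elevator_iter (s : String) (out : List Int) : Prop := out = elevator_iter_alt s
instance (s : String) (out : List Int) : Decidable (Spec_elevator_iter s out) := by unfold Spec_elevator_iter; infer_instance

-- ===== CLAIM (what is proved, stated in full; the proofs are below) =====
def Claim_equal_elevator_iter : Prop := ∀ (s : String), Dom_elevator_iter s → Spec_elevator_iter s (elevator_iter s)

-- ===== LEMMAS AND PROOFS =====

-- the common value: count of '(' minus count of ')' in a pfx
def pvCnt (l : List Char) : Int := (l.count '(' : Int) - (l.count ')' : Int)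

theorem pv_count_go_singleton (c : Char) (fuel : Nat) (l : List Char) (acc : Nat)
    (h : l.length ≤ fuel) :
    PySem.Chars.count.go [c] fuel l acc = acc + l.count c := by
  induction fuel generalizing l acc with
  | zero =>
    have : l = [] := List.length_eq_zero_iff.mp (Nat.le_zero.mp h)
    subst this; simp [PySem.Chars.count.go]
  | succ n ih =>
    cases l with
    | nil => simp [PySem.Chars.count.go]
    | cons x t =>
      simp only [PySem.Chars.count.go]
      by_cases hx : x = c
      · subst hx
        have hp : List.isPrefixOf [x] (x :: t) = true := by simp [List.isPrefixOf]
        simp only [hp, if_true]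
        rw [ih _ _ (by simpa using Nat.le_of_succ_le_succ h)]
        simp
        omega
      · have hp : List.isPrefixOf [c] (x :: t) = false := by
          simp [List.isPrefixOf]; exact fun h' => hx h'.symm
        simp only [hp, Bool.false_eq_true, if_false]
        rw [ih _ _ (by simpa using Nat.le_of_succ_le_succ h)]
        simp [hx]

theorem pv_count_singleton (l : List Char) (c : Char) :
    PySem.Chars.count l [c] = l.count c := by
  simp [PySem.Chars.count]
  have := pv_count_go_singleton c l.length l 0 le_rfl
  omega

-- A's loop yields, for each index k, the pfx count of the first k+1 characters
theorem pv_loopA (l : List Char) (done : List Int) (p : Int) :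
    (l.foldl (fun (acc : List Int × Int) c =>
      let position := acc.2
      let position := if c = '(' then position + 1 else position
      let position := if c = ')' then position - 1 else position
      (acc.1 ++ [position], position)) (done, p)).1
    = done ++ (List.range l.length).map (fun k => p + pvCnt (l.take (k + 1))) := by
  induction l generalizing done p with
  | nil => simp
  | cons c cs ih =>
    simp only [List.foldl]
    rw [ih]
    have hcons : ∀ (t : List Char), pvCnt (c :: t) = pvCnt [c] + pvCnt t := by
      intro t
      by_cases h1 : c = '(' <;> by_cases h2 : c = ')' <;>
        simp [h1, h2, pvCnt] <;> ring
    have hstep : (if c = ')' then (if c = '(' then p + 1 else p) - 1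
        else (if c = '(' then p + 1 else p)) = p + pvCnt [c] := by
      by_cases h1 : c = '('
      · subst h1; simp [pvCnt]
      · by_cases h2 : c = ')'
        · subst h2; simp [pvCnt, h1]; ring
        · simp [pvCnt, h1, h2]
    rw [hstep, List.append_assoc]
    congr 1
    rw [List.length_cons, List.range_succ_eq_map, List.map_cons, List.map_map,
        List.singleton_append]
    have htail : (List.range cs.length).map
        (fun k => p + pvCnt [c] + pvCnt (cs.take (k + 1)))
        = (List.range cs.length).map
          ((fun k => p + pvCnt ((c :: cs).take (k + 1))) ∘ Nat.succ) := by
      apply List.map_congr_left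
      intro k _
      simp only [Function.comp_apply, List.take_succ_cons]
      rw [hcons (cs.take (k + 1))]
      ring
    rw [htail]
    congr 1

-- B's map yields the same pfx counts
theorem pv_B_eq (l : List Char) :
    (PySem.List.pyRange 0 (l.length : Int) 1).map (fun i =>
      let pfx := PySem.List.slice l none (some (i + 1))
      (PySem.Chars.count pfx ['('] : Int) - (PySem.Chars.count pfx [')'] : Int))
    = (List.range l.length).map (fun k => pvCnt (l.take (k + 1))) := by
  rw [PySem.List.pyRange_zero_natCast, List.map_map]
  apply List.map_congr_left
  intro k _
  simp only [Function.comp]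
  have : ((k : Int) + 1) = ((k + 1 : Nat) : Int) := by push_cast; ring
  rw [this, PySem.List.slice_to_natCast]
  simp [pv_count_singleton, pvCnt]

-- ===== VERDICT (by name: the statement is the Claim_ definition above) =====
theorem elevator_iter_spec : Claim_equal_elevator_iter := by
  intro s _
  unfold Spec_elevator_iter elevator_iter elevator_iter_alt
  rw [pv_B_eq]
  simpa using pv_loopA s.toList [] 0
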